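-- pv_equiv track=rewrite | github.com/a-curious-coder/theforge | cv_reducer.py | reconstruct_section
-- ===== SOURCE A (Python) =====
-- def reconstruct_section(original_lines, ranked_items):
--     new_lines = []
--     for line in original_lines:
--         if r'\section' in line or r'\subsection' in line:
--             if any(item.startswith(line) for item in ranked_items):
--                 new_lines.append(line)
--         elif r'\item' in line:
--             if any(item.strip() == line.strip() for item in ranked_items):
--                 new_lines.append(line)
--         else:
--             new_lines.append(line)
--     return new_lines
-- ===== SOURCE B (Python) =====
-- def reconstruct_section(original_lines, ranked_items):
--     # Precomputed indexes: the set of all prefixes of the ranked items and the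
--     # set of stripped items; each line is then decided by a set lookup.
--     prefixes = {item[:i] for item in ranked_items for i in range(len(item) + 1)}
--     stripped = {item.strip() for item in ranked_items}
--
--     def keep(line):
--         if '\\section' in line or '\\subsection' in line:
--             return line in prefixes
--         if '\\item' in line:
--             return line.strip() in stripped
--         return True
--
--     return [line for line in original_lines if keep(line)]
-- ===== Notes on version B (the rewrite author's own statement) =====
-- stated objective: alternative
-- what changed: B precomputes two sets once (all prefixes of the ranked items, and the stripped ranked items) so each line's decision is a set lookup instead of A's per-line any() scan over all ranked items with repeated startswith/strip; B trades the per-line scans for an O(m*L^2) prefix-set build.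
import Mathlib
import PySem

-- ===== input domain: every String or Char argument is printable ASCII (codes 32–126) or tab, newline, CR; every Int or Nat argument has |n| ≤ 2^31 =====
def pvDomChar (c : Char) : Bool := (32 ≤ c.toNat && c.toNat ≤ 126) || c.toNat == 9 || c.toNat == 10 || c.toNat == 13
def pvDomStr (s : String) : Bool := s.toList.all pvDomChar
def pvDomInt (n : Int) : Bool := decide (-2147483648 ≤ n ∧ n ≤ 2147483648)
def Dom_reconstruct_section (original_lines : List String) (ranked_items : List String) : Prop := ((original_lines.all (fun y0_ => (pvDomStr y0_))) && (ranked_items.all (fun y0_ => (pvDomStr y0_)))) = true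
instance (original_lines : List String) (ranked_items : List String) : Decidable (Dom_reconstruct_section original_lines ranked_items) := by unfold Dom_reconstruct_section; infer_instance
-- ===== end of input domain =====

-- B replaces A's per-line scans over ranked_items by two sets precomputed once
-- (all prefixes of the items; the stripped items), so each line becomes a lookup.

-- ===== PORT A =====
def reconstruct_section (original_lines : List String) (ranked_items : List String) : List String :=
  original_lines.foldl (fun new_lines line =>
    if PySem.Str.isIn "\\section" line || PySem.Str.isIn "\\subsection" line then
      if ranked_items.any (fun item => PySem.Str.startswith item line) then
        new_lines ++ [line]
      else new_lines
    else if PySem.Str.isIn "\\item" line then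
      if ranked_items.any (fun item => PySem.Str.strip item == PySem.Str.strip line) then
        new_lines ++ [line]
      else new_lines
    else new_lines ++ [line]) []

-- ===== PORT B =====
-- prefixes = {item[:i] for item in ranked_items for i in range(len(item) + 1)}
def pvPrefixes (ranked_items : List String) : PySem.Set String :=
  ranked_items.foldl (fun s item =>
    (PySem.List.pyRange 0 (PySem.Str.len item + 1) 1).foldl
      (fun s i => PySem.Set.add s (PySem.Str.slice item none (some i))) s)
    PySem.Set.empty

-- stripped = {item.strip() for item in ranked_items}
def pvStripped (ranked_items : List String) : PySem.Set String :=
  ranked_items.foldl (fun s item => PySem.Set.add s (PySem.Str.strip item)) PySem.Set.empty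

-- def keep(line): ...
def pvKeep (prefixes : PySem.Set String) (stripped : PySem.Set String) (line : String) : Bool :=
  if PySem.Str.isIn "\\section" line || PySem.Str.isIn "\\subsection" line then
    PySem.Set.contains prefixes line
  else if PySem.Str.isIn "\\item" line then
    PySem.Set.contains stripped (PySem.Str.strip line)
  else true

def reconstruct_section_alt (original_lines : List String) (ranked_items : List String) : List String :=
  original_lines.filter (pvKeep (pvPrefixes ranked_items) (pvStripped ranked_items))

-- ===== PRECONDITION & SPEC =====
def Spec_reconstruct_section (original_lines : List String) (ranked_items : List String) (out : List String) : Prop := out = reconstruct_section_alt original_lines ranked_items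
instance (original_lines : List String) (ranked_items : List String) (out : List String) : Decidable (Spec_reconstruct_section original_lines ranked_items out) := by unfold Spec_reconstruct_section; infer_instance

-- ===== CLAIM (what is proved, stated in full; the proofs are below) =====
def Claim_equal_reconstruct_section : Prop := ∀ (original_lines : List String) (ranked_items : List String), Dom_reconstruct_section original_lines ranked_items → Spec_reconstruct_section original_lines ranked_items (reconstruct_section original_lines ranked_items)

-- ===== LEMMAS AND PROOFS =====

-- membership in a fold of Set.add over generated elements
theorem pv_mem_foldl_add {β : Type} (l : List β) (f : β → String) (s0 : PySem.Set String) (x : String) :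
    x ∈ l.foldl (fun s y => PySem.Set.add s (f y)) s0 ↔ x ∈ s0 ∨ ∃ y ∈ l, x = f y := by
  induction l generalizing s0 with
  | nil => simp
  | cons h t ih =>
    rw [List.foldl_cons, ih, PySem.Set.mem_add, List.exists_mem_cons_iff]
    tauto

-- the prefix-slices of one item are exactly the prefixes of its character list
theorem pv_slice_prefix (item x : String) :
    (∃ i ∈ PySem.List.pyRange 0 (PySem.Str.len item + 1) 1, x = PySem.Str.slice item none (some i))
      ↔ x.toList <+: item.toList := by
  constructor
  · rintro ⟨i, hi, rfl⟩
    rw [PySem.List.mem_pyRange_one] at hi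
    have hs : (PySem.Str.slice item none (some i)).toList = item.toList.take i.toNat := by
      rw [PySem.Str.toList_slice, PySem.Chars.slice_eq_listSlice, PySem.List.slice_to _ hi.1]
    rw [hs]
    exact List.take_prefix _ _
  · intro hp
    refine ⟨(x.toList.length : Int), ?_, ?_⟩
    · rw [PySem.List.mem_pyRange_one, PySem.Str.len_eq]
      have := hp.length_le
      omega
    · apply String.ext
      rw [PySem.Str.toList_slice, PySem.Chars.slice_eq_listSlice,
        PySem.List.slice_to _ (by exact_mod_cast Nat.zero_le x.toList.length)]
      simpa using List.prefix_iff_eq_take.mp hp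

theorem pv_mem_prefixes (ri : List String) (x : String) :
    x ∈ pvPrefixes ri ↔ ∃ item ∈ ri, x.toList <+: item.toList := by
  unfold pvPrefixes
  have aux : ∀ (l : List String) (s0 : PySem.Set String),
      x ∈ l.foldl (fun s item =>
        (PySem.List.pyRange 0 (PySem.Str.len item + 1) 1).foldl
          (fun s i => PySem.Set.add s (PySem.Str.slice item none (some i))) s) s0
      ↔ x ∈ s0 ∨ ∃ item ∈ l, x.toList <+: item.toList := by
    intro l
    induction l with
    | nil => simp
    | cons h t ih =>
      intro s0
      rw [List.foldl_cons, ih, pv_mem_foldl_add, pv_slice_prefix, List.exists_mem_cons_iff]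
      tauto
  rw [aux]
  simp [PySem.Set.empty]

theorem pv_mem_stripped (ri : List String) (x : String) :
    x ∈ pvStripped ri ↔ ∃ item ∈ ri, x = PySem.Str.strip item := by
  unfold pvStripped
  rw [pv_mem_foldl_add]
  simp [PySem.Set.empty]

-- A's startswith scan answers exactly the prefix-set lookup
theorem pv_any_startswith (ri : List String) (line : String) :
    (ri.any fun item => PySem.Str.startswith item line)
      = PySem.Set.contains (pvPrefixes ri) line := by
  apply Bool.coe_iff_coe.mp
  rw [PySem.Set.contains_iff, pv_mem_prefixes]
  simp [PySem.Str.startswith_eq, PySem.Chars.startswith_iff]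

-- A's strip-equality scan answers exactly the stripped-set lookup
theorem pv_any_strip (ri : List String) (line : String) :
    (ri.any fun item => PySem.Str.strip item == PySem.Str.strip line)
      = PySem.Set.contains (pvStripped ri) (PySem.Str.strip line) := by
  apply Bool.coe_iff_coe.mp
  rw [PySem.Set.contains_iff, pv_mem_stripped]
  simp only [List.any_eq_true, beq_iff_eq]
  exact ⟨fun ⟨a, h1, h2⟩ => ⟨a, h1, h2.symm⟩, fun ⟨a, h1, h2⟩ => ⟨a, h1, h2.symm⟩⟩

-- A's loop body is "append line iff pvKeep"
theorem pv_fun_eq (ri : List String) :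
    (fun (new_lines : List String) (line : String) =>
      if PySem.Str.isIn "\\section" line || PySem.Str.isIn "\\subsection" line then
        if ri.any (fun item => PySem.Str.startswith item line) then
          new_lines ++ [line]
        else new_lines
      else if PySem.Str.isIn "\\item" line then
        if ri.any (fun item => PySem.Str.strip item == PySem.Str.strip line) then
          new_lines ++ [line]
        else new_lines
      else new_lines ++ [line])
    = fun new_lines line =>
        if pvKeep (pvPrefixes ri) (pvStripped ri) line then new_lines ++ [line]
        else new_lines := by
  funext acc line
  unfold pvKeep
  rw [← pv_any_startswith, ← pv_any_strip]
  cases hc1 : (PySem.Str.isIn "\\section" line || PySem.Str.isIn "\\subsection" line) <;>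
    cases hc2 : PySem.Str.isIn "\\item" line <;>
      simp

-- ===== VERDICT (by name: the statement is the Claim_ definition above) =====
theorem reconstruct_section_spec : Claim_equal_reconstruct_section := by
  intro original_lines ranked_items _
  unfold Spec_reconstruct_section reconstruct_section reconstruct_section_alt
  rw [pv_fun_eq ranked_items, PySem.List.foldl_append_if_eq_filter]
  simp
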